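-- pv_equiv track=rewrite | github.com/mohammadsoleimanirad/variable-calculator | meshnovisuals.py | mesh_grid
-- ===== SOURCE A (Python) =====
-- def mesh_grid(central_position, size, step_size=1):
--     # Ensure the central position and size are of the same length
--     if len(central_position) != len(size):
--         raise ValueError("Central position and size must have the same length.")
--
--     # Calculate the number of points in each dimension
--     dimensions = []
--     for dim_size in size:
--         # Calculate the number of points, adding 1 for the central point
--         num_points = (dim_size // step_size) + 1
--         dimensions.append(num_points)
--
--     # Create the mesh grid
--     grid = []
--     for i in range(dimensions[0]):
--         row = []
--         for j in range(dimensions[1]):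
--             # Calculate the coordinates based on the central position and step size
--             x = central_position[0] + (i - dimensions[0] // 2) * step_size
--             y = central_position[1] + (j - dimensions[1] // 2) * step_size
--             row.append((x, y))
--         grid.append(row)
--
--     return grid
-- ===== SOURCE B (Python) =====
-- def mesh_grid(central_position, size, step_size=1):
--     # Build one base row, then generate each further row by translating the
--     # previous row along x; points come from a running-sum recurrence, not from
--     # per-cell index arithmetic.
--     if len(central_position) != len(size):
--         raise ValueError("Central position and size must have the same length.")
--     n0 = size[0] // step_size + 1
--     n1 = size[1] // step_size + 1
--     x0 = central_position[0] - (n0 // 2) * step_size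
--     y = central_position[1] - (n1 // 2) * step_size
--     row = []
--     for _ in range(n1):
--         row.append((x0, y))
--         y += step_size
--     grid = []
--     for _ in range(n0):
--         grid.append(row)
--         row = [(x + step_size, y) for (x, y) in row]
--     return grid
-- ===== Notes on version B (the rewrite author's own statement) =====
-- stated objective: faster
-- what changed: B abandons A's per-cell closed-form index arithmetic: it builds a single base row by a running-sum recurrence (y += step) and then produces every further row by translating the previous row along x, so no cell is ever computed from its (i,j) indices (less arithmetic per cell); A's counting loop over all of size is also dropped.
-- outside the precondition, e.g. on mesh_grid([0], [-5], 1): A returns [], B raises IndexError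
import Mathlib
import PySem

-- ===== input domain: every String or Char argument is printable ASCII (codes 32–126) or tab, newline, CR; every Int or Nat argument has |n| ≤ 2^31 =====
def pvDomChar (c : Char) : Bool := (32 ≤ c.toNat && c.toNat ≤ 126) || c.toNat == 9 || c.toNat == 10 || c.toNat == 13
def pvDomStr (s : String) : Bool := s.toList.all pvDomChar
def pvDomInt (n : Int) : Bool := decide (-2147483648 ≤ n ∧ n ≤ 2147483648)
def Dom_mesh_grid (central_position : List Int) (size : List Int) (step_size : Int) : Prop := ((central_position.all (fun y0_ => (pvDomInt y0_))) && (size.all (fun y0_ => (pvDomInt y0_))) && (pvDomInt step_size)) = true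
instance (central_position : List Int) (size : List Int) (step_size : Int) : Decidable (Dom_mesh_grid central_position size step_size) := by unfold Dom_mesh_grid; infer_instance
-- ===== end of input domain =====

-- B builds one base row by a running-sum recurrence and derives every further row by
-- translating the previous row along x (no per-cell index arithmetic); alternative algorithm.


-- ===== PORT A =====
def mesh_grid (central_position : List Int) (size : List Int) (step_size : Int) : List (List (Int × Int)) :=
  let dimensions := size.foldl (fun acc dim_size => acc ++ [PySem.Int.floordiv dim_size step_size + 1]) []
  let dim0 := PySem.List.pyGetD dimensions 0 0
  let dim1 := PySem.List.pyGetD dimensions 1 0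
  (PySem.List.pyRange 0 dim0 1).foldl (fun grid i =>
    grid ++ [(PySem.List.pyRange 0 dim1 1).foldl (fun row j =>
      row ++ [(PySem.List.pyGetD central_position 0 0 + (i - PySem.Int.floordiv dim0 2) * step_size,
               PySem.List.pyGetD central_position 1 0 + (j - PySem.Int.floordiv dim1 2) * step_size)]) []]) []

-- ===== PORT B =====
def mesh_grid_alt (central_position : List Int) (size : List Int) (step_size : Int) : List (List (Int × Int)) :=
  let n0 := PySem.Int.floordiv (PySem.List.pyGetD size 0 0) step_size + 1
  let n1 := PySem.Int.floordiv (PySem.List.pyGetD size 1 0) step_size + 1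
  let x0 := PySem.List.pyGetD central_position 0 0 - PySem.Int.floordiv n0 2 * step_size
  -- base row: running-sum loop over y
  let ry := (PySem.List.pyRange 0 n1 1).foldl
      (fun (s : List (Int × Int) × Int) _ => (s.1 ++ [(x0, s.2)], s.2 + step_size))
      ([], PySem.List.pyGetD central_position 1 0 - PySem.Int.floordiv n1 2 * step_size)
  -- grid: repeatedly emit the row, then translate it along x
  let gr := (PySem.List.pyRange 0 n0 1).foldl
      (fun (s : List (List (Int × Int)) × List (Int × Int)) _ =>
        (s.1 ++ [s.2], s.2.map (fun p => (p.1 + step_size, p.2))))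
      ([], ry.1)
  gr.1

-- ===== PRECONDITION & SPEC =====
-- Pre_ excludes: mismatched lengths (A raises ValueError), step_size = 0 (ZeroDivisionError),
-- and lengths < 2, where A raises IndexError on dimensions[0]/dimensions[1] — except the
-- length-1 case with a non-positive first point count, where A returns [] but B naturally
-- raises IndexError computing the second axis, so those inputs stay excluded.
def Pre_mesh_grid (central_position : List Int) (size : List Int) (step_size : Int) : Prop :=
  central_position.length = size.length ∧ step_size ≠ 0 ∧ 2 ≤ size.length
instance (central_position : List Int) (size : List Int) (step_size : Int) : Decidable (Pre_mesh_grid central_position size step_size) := by unfold Pre_mesh_grid; infer_instance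
def pvWitness_mesh_grid : List Int × List Int × Int := ([0, 0], [2, 3], 1)
def Spec_mesh_grid (central_position : List Int) (size : List Int) (step_size : Int) (out : List (List (Int × Int))) : Prop := out = mesh_grid_alt central_position size step_size
instance (central_position : List Int) (size : List Int) (step_size : Int) (out : List (List (Int × Int))) : Decidable (Spec_mesh_grid central_position size step_size out) := by unfold Spec_mesh_grid; infer_instance

-- ===== CLAIM =====
def Claim_equal_mesh_grid : Prop := ∀ (central_position : List Int) (size : List Int) (step_size : Int), Dom_mesh_grid central_position size step_size → Pre_mesh_grid central_position size step_size → Spec_mesh_grid central_position size step_size (mesh_grid central_position size step_size)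

-- ===== LEMMAS AND PROOFS =====

-- B's base-row loop (the loop variable is ignored): the running sum unrolls to an indexed map.
theorem rowFold {α : Type} (x0 step : Int) (l : List α) :
    ∀ (acc : List (Int × Int)) (y : Int),
    l.foldl (fun (s : List (Int × Int) × Int) _ => (s.1 ++ [(x0, s.2)], s.2 + step)) (acc, y)
    = (acc ++ (List.range l.length).map (fun j : Nat => (x0, y + (j : Int) * step)),
       y + (l.length : Int) * step) := by
  induction l with
  | nil => intro acc y; simp
  | cons a l ih =>
    intro acc y
    rw [List.foldl_cons, ih]
    simp only [List.length_cons, List.range_succ_eq_map, List.map_cons, List.map_map,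
      List.append_assoc, List.singleton_append, Prod.mk.injEq]
    refine ⟨?_, by push_cast; ring⟩
    congr 1
    congr 1
    · simp
    apply List.map_congr_left; intro j _
    simp only [Function.comp, Prod.mk.injEq]; refine ⟨by trivial, by push_cast; ring⟩

-- B's grid loop: emitting then translating unrolls to shifted copies of the base row.
theorem gridFold {α : Type} (step : Int) (l : List α) :
    ∀ (acc : List (List (Int × Int))) (row : List (Int × Int)),
    l.foldl
      (fun (s : List (List (Int × Int)) × List (Int × Int)) _ =>
        (s.1 ++ [s.2], s.2.map (fun p => (p.1 + step, p.2)))) (acc, row)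
    = (acc ++ (List.range l.length).map (fun i : Nat => row.map (fun p => (p.1 + (i : Int) * step, p.2))),
       row.map (fun p => (p.1 + (l.length : Int) * step, p.2))) := by
  induction l with
  | nil =>
    intro acc row
    simp only [List.length_nil, List.range_zero, List.foldl_nil, List.map_nil, List.append_nil,
      Int.natCast_zero, Int.zero_mul, Int.add_zero, Prod.mk.injEq]
    refine ⟨by trivial, ?_⟩
    conv_lhs => rw [← List.map_id row]
    exact List.map_congr_left (fun p _ => by simp)
  | cons a l ih =>
    intro acc row
    rw [List.foldl_cons, ih]
    simp only [List.length_cons, List.range_succ_eq_map, List.map_cons, List.map_map,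
      List.append_assoc, List.singleton_append, Prod.mk.injEq]
    constructor
    · congr 1
      congr 1
      · conv_lhs => rw [← List.map_id row]
        apply List.map_congr_left; intro p _; simp
      apply List.map_congr_left; intro i _
      simp only [Function.comp, List.map_map]
      apply List.map_congr_left; intro p _
      simp only [Function.comp, Prod.mk.injEq]; refine ⟨by push_cast; ring, by trivial⟩
    · apply List.map_congr_left; intro p _
      simp only [Function.comp, Prod.mk.injEq]; refine ⟨by push_cast; ring, by trivial⟩

-- ===== VERDICT =====
theorem mesh_grid_spec : Claim_equal_mesh_grid := by
  intro cp size step _ hpre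
  obtain ⟨hlen, hstep, hsz⟩ := hpre
  match cp, size with
  | c0 :: c1 :: cr, s0 :: s1 :: sr =>
    show _ = mesh_grid_alt _ _ _
    simp only [mesh_grid, mesh_grid_alt, PySem.List.foldl_append_singleton_eq_map,
      PySem.List.pyGetD_ofNat', List.map_cons, List.getD_cons_zero, List.getD_cons_succ,
      List.nil_append, PySem.List.pyRange_one, List.foldl_map, List.map_map,
      rowFold, gridFold, List.length_range]
    apply List.map_congr_left
    intro i _
    apply List.map_congr_left
    intro j _
    simp only [Function.comp, Prod.mk.injEq]
    constructor <;> ring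
  | [], _ => simp at hlen hsz; omega
  | [_], _ => simp at hlen hsz; omega
  | _ :: _ :: _, [] => simp at hsz
  | _ :: _ :: _, [_] => simp at hsz
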